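-- pv_equiv track=rewrite | github.com/ALMOWAFI/Elmowafiplatform | backend/family_travel_ai.py | _get_day_specific_tips
-- ===== SOURCE A (Python) =====
-- from typing import Dict, List, Any, Optional
--
-- def _get_day_specific_tips(attractions: List[Dict]) -> List[str]:
--     """Get tips specific to the day's activities"""
--     tips = []
--
--     # Check if day has outdoor activities
--     outdoor_activities = [a for a in attractions if "park" in a.get("name", "").lower() or "outdoor" in a.get("name", "").lower()]
--     if outdoor_activities:
--         tips.append("Check weather forecast and dress appropriately for outdoor activities")
--
--     # Check for expensive activities
--     expensive_activities = [a for a in attractions if a.get("cost") == "expensive"]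
--     if expensive_activities:
--         tips.append("Budget planning: This day includes premium attractions")
--
--     # Check for cultural sites
--     cultural_activities = [a for a in attractions if any(word in a.get("name", "").lower() for word in ["mosque", "church", "museum", "palace"])]
--     if cultural_activities:
--         tips.append("Dress modestly for cultural and religious sites")
--
--     return tips or ["Have a wonderful day exploring!"]
-- ===== SOURCE B (Python) =====
-- from typing import Dict, List, Any, Optional
--
-- def _get_day_specific_tips(attractions: List[Dict]) -> List[str]:
--     """Single pass over attractions, maintaining three boolean flags."""
--     has_outdoor = has_expensive = has_cultural = False
--     for a in attractions:
--         name = a.get("name", "").lower()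
--         if "park" in name or "outdoor" in name:
--             has_outdoor = True
--         if a.get("cost") == "expensive":
--             has_expensive = True
--         if any(word in name for word in ["mosque", "church", "museum", "palace"]):
--             has_cultural = True
--     tips = []
--     if has_outdoor:
--         tips.append("Check weather forecast and dress appropriately for outdoor activities")
--     if has_expensive:
--         tips.append("Budget planning: This day includes premium attractions")
--     if has_cultural:
--         tips.append("Dress modestly for cultural and religious sites")
--     return tips or ["Have a wonderful day exploring!"]
-- ===== Notes on version B (the rewrite author's own statement) =====
-- stated objective: alternative
-- what changed: B replaces A's three separate filter passes (each materialising a list of matching attractions) with one loop over the attractions that maintains three boolean flags, then emits the three fixed tips from the flags.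
import Mathlib
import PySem

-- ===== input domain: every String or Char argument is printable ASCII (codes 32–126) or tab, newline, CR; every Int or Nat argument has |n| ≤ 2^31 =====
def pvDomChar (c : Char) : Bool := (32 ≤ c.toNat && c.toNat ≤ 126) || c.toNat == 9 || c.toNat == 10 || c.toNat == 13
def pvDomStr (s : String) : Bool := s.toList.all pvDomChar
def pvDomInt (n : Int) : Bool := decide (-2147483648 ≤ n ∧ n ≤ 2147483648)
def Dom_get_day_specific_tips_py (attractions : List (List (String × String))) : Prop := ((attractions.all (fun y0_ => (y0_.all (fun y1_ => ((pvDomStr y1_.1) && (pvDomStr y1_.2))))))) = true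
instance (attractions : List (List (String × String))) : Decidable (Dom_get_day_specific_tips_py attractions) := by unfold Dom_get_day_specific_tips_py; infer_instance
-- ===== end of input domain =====

-- B replaces A's three filter passes with one flag-accumulating pass over the attractions (alternative decomposition).


-- ===== PORT A =====
-- "park" in a.get("name","").lower() or "outdoor" in a.get("name","").lower()
def pvOutdoorP (a : List (String × String)) : Bool :=
  PySem.Str.isIn "park" (PySem.Str.lower (PySem.Dict.getD (PySem.Dict.mk a) "name" "")) ||
  PySem.Str.isIn "outdoor" (PySem.Str.lower (PySem.Dict.getD (PySem.Dict.mk a) "name" ""))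

-- a.get("cost") == "expensive"
def pvExpensiveP (a : List (String × String)) : Bool :=
  PySem.Dict.get? (PySem.Dict.mk a) "cost" == some "expensive"

-- any(word in a.get("name","").lower() for word in ["mosque","church","museum","palace"])
def pvCulturalP (a : List (String × String)) : Bool :=
  (["mosque", "church", "museum", "palace"].any
    (fun word => PySem.Str.isIn word (PySem.Str.lower (PySem.Dict.getD (PySem.Dict.mk a) "name" ""))))

def get_day_specific_tips_py (attractions : List (List (String × String))) : List String :=
  let tips : List String := []
  let outdoor_activities := attractions.filter pvOutdoorP
  let tips := if outdoor_activities.isEmpty then tips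
              else tips ++ ["Check weather forecast and dress appropriately for outdoor activities"]
  let expensive_activities := attractions.filter pvExpensiveP
  let tips := if expensive_activities.isEmpty then tips
              else tips ++ ["Budget planning: This day includes premium attractions"]
  let cultural_activities := attractions.filter pvCulturalP
  let tips := if cultural_activities.isEmpty then tips
              else tips ++ ["Dress modestly for cultural and religious sites"]
  if tips.isEmpty then ["Have a wonderful day exploring!"] else tips

-- ===== PORT B =====
-- one pass: fold three boolean flags over the attractions, then emit the fixed tips
def get_day_specific_tips_py_alt (attractions : List (List (String × String))) : List String :=
  let flags := attractions.foldl
    (fun (f : Bool × Bool × Bool) a =>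
      let name := PySem.Str.lower (PySem.Dict.getD (PySem.Dict.mk a) "name" "")
      ((if PySem.Str.isIn "park" name || PySem.Str.isIn "outdoor" name then true else f.1),
       (if PySem.Dict.get? (PySem.Dict.mk a) "cost" == some "expensive" then true else f.2.1),
       (if ["mosque", "church", "museum", "palace"].any (fun word => PySem.Str.isIn word name)
        then true else f.2.2)))
    (false, false, false)
  let tips : List String :=
    (if flags.1 then ["Check weather forecast and dress appropriately for outdoor activities"] else []) ++
    (if flags.2.1 then ["Budget planning: This day includes premium attractions"] else []) ++
    (if flags.2.2 then ["Dress modestly for cultural and religious sites"] else [])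
  if tips.isEmpty then ["Have a wonderful day exploring!"] else tips

-- ===== PRECONDITION & SPEC =====
def Spec_get_day_specific_tips_py (attractions : List (List (String × String))) (out : List String) : Prop := out = get_day_specific_tips_py_alt attractions
instance (attractions : List (List (String × String))) (out : List String) : Decidable (Spec_get_day_specific_tips_py attractions out) := by unfold Spec_get_day_specific_tips_py; infer_instance

-- ===== CLAIM (what is proved, stated in full; the proofs are below) =====
def Claim_equal_get_day_specific_tips_py : Prop := ∀ (attractions : List (List (String × String))), Dom_get_day_specific_tips_py attractions → Spec_get_day_specific_tips_py attractions (get_day_specific_tips_py attractions)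

-- ===== LEMMAS AND PROOFS =====

-- Generic: folding three "set on first match" flags computes the three List.any values.
theorem pv_fold_flags_gen {A : Type} (p q r : A → Bool) (l : List A) (b1 b2 b3 : Bool) :
    l.foldl
      (fun (f : Bool × Bool × Bool) a =>
        ((if p a then true else f.1),
         (if q a then true else f.2.1),
         (if r a then true else f.2.2)))
      (b1, b2, b3)
    = (b1 || l.any p, b2 || l.any q, b3 || l.any r) := by
  induction l generalizing b1 b2 b3 with
  | nil => simp
  | cons a t ih =>
    simp only [List.foldl_cons, List.any_cons, ih]
    cases p a <;> cases q a <;> cases r a <;> simp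

-- B's fold is an instance of the generic flag fold (the let-bound name zeta-reduces away).
theorem pv_fold_flags (attractions : List (List (String × String))) (b1 b2 b3 : Bool) :
    attractions.foldl
      (fun (f : Bool × Bool × Bool) a =>
        let name := PySem.Str.lower (PySem.Dict.getD (PySem.Dict.mk a) "name" "")
        ((if PySem.Str.isIn "park" name || PySem.Str.isIn "outdoor" name then true else f.1),
         (if PySem.Dict.get? (PySem.Dict.mk a) "cost" == some "expensive" then true else f.2.1),
         (if ["mosque", "church", "museum", "palace"].any (fun word => PySem.Str.isIn word name)
          then true else f.2.2)))
      (b1, b2, b3)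
    = (b1 || attractions.any pvOutdoorP,
       b2 || attractions.any pvExpensiveP,
       b3 || attractions.any pvCulturalP) :=
  pv_fold_flags_gen pvOutdoorP pvExpensiveP pvCulturalP attractions b1 b2 b3

theorem pv_filter_isEmpty {A : Type} (p : A → Bool) (l : List A) :
    (l.filter p).isEmpty = !(l.any p) := by
  induction l with
  | nil => simp
  | cons a t ih => by_cases h : p a <;> simp [h, ih]

-- ===== VERDICT (by name: the statement is the Claim_ definition above) =====
theorem get_day_specific_tips_py_spec : Claim_equal_get_day_specific_tips_py := by
  intro attractions _
  show get_day_specific_tips_py attractions = get_day_specific_tips_py_alt attractions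
  unfold get_day_specific_tips_py get_day_specific_tips_py_alt
  simp only [pv_fold_flags, pv_filter_isEmpty, Bool.false_or]
  cases h1 : attractions.any pvOutdoorP <;> cases h2 : attractions.any pvExpensiveP <;>
    cases h3 : attractions.any pvCulturalP <;> simp
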